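-- pv_equiv track=rewrite | github.com/mfxuus/music-x-flute | test_songs.py | input_to_fingers
-- ===== SOURCE A (Python) =====
-- KEYBOARD_KEYS = ['m', 'n', 'b', '3', '2', '1']
--
-- def input_to_fingers(input_str):
--     # 'mnb3' --> [0, 1, 2, 3]
--     fingers = []
--     i = 0
--     for k in KEYBOARD_KEYS:
--         if k in input_str:
--             fingers.append(i)
--         i += 1
--     return fingers
-- ===== SOURCE B (Python) =====
-- KEYBOARD_KEYS = ['m', 'n', 'b', '3', '2', '1']
--
-- def input_to_fingers(input_str):
--     # 'mnb3' --> [0, 1, 2, 3]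
--     key_to_index = {k: i for i, k in enumerate(KEYBOARD_KEYS)}
--     found = set()
--     for ch in input_str:
--         i = key_to_index.get(ch)
--         if i is not None:
--             found.add(i)
--     return sorted(found)
-- ===== Notes on version B (the rewrite author's own statement) =====
-- stated objective: alternative
-- what changed: B inverts the traversal: instead of scanning the fixed key list and testing each key for substring membership in the input, it builds a key-to-index dict once, makes one pass over the input characters collecting matched indices into a set, and returns them sorted.
import Mathlib
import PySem

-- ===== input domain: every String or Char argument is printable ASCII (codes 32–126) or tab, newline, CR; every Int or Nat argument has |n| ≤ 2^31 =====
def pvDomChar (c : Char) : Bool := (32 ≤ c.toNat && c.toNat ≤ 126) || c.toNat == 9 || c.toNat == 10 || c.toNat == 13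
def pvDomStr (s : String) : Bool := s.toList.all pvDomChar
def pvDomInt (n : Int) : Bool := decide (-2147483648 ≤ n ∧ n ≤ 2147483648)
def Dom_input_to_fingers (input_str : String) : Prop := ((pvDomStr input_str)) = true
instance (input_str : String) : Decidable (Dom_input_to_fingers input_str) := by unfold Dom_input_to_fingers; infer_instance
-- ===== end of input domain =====

-- B builds a char→index dict and scans the input once, returning the sorted set of hit indices,
-- instead of A's scan over the fixed key list with a substring test per key (objective: alternative).

-- ===== PORT A =====
def keyboardKeys : List String := ["m", "n", "b", "3", "2", "1"]

def input_to_fingers (input_str : String) : List Int :=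
  (keyboardKeys.foldl
    (fun (st : List Int × Int) k =>
      ((if PySem.Str.isIn k input_str then st.1 ++ [st.2] else st.1), st.2 + 1))
    (([] : List Int), (0 : Int))).1

-- ===== PORT B =====
def keyboardKeyChars : List Char := ['m', 'n', 'b', '3', '2', '1']

def keyToIndex : PySem.Dict Char Int :=
  (PySem.List.enumerate keyboardKeyChars).foldl
    (fun d p => d.insert p.2 p.1) PySem.Dict.empty

def input_to_fingers_alt (input_str : String) : List Int :=
  let found := input_str.toList.foldl
    (fun (st : PySem.Set Int) ch =>
      match keyToIndex.get? ch with
      | some i => PySem.Set.add st i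
      | none => st)
    PySem.Set.empty
  PySem.List.sorted found (fun x => x) false

-- ===== PRECONDITION & SPEC =====
def Spec_input_to_fingers (input_str : String) (out : List Int) : Prop := out = input_to_fingers_alt input_str
instance (input_str : String) (out : List Int) : Decidable (Spec_input_to_fingers input_str out) := by unfold Spec_input_to_fingers; infer_instance

-- ===== CLAIM (what is proved, stated in full; the proofs are below) =====
def Claim_equal_input_to_fingers : Prop := ∀ (input_str : String), Dom_input_to_fingers input_str → Spec_input_to_fingers input_str (input_to_fingers input_str)

-- ===== LEMMAS AND PROOFS =====

-- A's result written as an explicit concatenation of per-key hits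
def aShape (s : String) : List Int :=
  (if PySem.Str.isIn "m" s then [(0 : Int)] else []) ++
  (if PySem.Str.isIn "n" s then [(1 : Int)] else []) ++
  (if PySem.Str.isIn "b" s then [(2 : Int)] else []) ++
  (if PySem.Str.isIn "3" s then [(3 : Int)] else []) ++
  (if PySem.Str.isIn "2" s then [(4 : Int)] else []) ++
  (if PySem.Str.isIn "1" s then [(5 : Int)] else [])

theorem input_to_fingers_eq_aShape (s : String) : input_to_fingers s = aShape s := by
  simp only [input_to_fingers, keyboardKeys, List.foldl, aShape]
  split_ifs <;> rfl

theorem aShape_pairwise_lt (s : String) : (aShape s).Pairwise (· < ·) := by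
  unfold aShape
  split_ifs <;> decide

theorem keyToIndex_eq :
    keyToIndex = PySem.Dict.mk [('m', (0 : Int)), ('n', 1), ('b', 2), ('3', 3), ('2', 4), ('1', 5)] := by
  rfl

theorem get?_keyToIndex (ch : Char) :
    keyToIndex.get? ch =
      if 'm' = ch then some 0 else if 'n' = ch then some 1 else if 'b' = ch then some 2
      else if '3' = ch then some 3 else if '2' = ch then some 4 else if '1' = ch then some 5
      else none := by
  rw [keyToIndex_eq]
  simp only [PySem.Dict.get?_mk_cons, beq_iff_eq]
  split_ifs <;> simp [PySem.Dict.get?]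

theorem fold_eq_filterMap (l : List Char) (st : PySem.Set Int) :
    l.foldl
      (fun (st : PySem.Set Int) ch =>
        match keyToIndex.get? ch with
        | some i => PySem.Set.add st i
        | none => st) st
    = (l.filterMap keyToIndex.get?).foldl PySem.Set.add st := by
  induction l generalizing st with
  | nil => rfl
  | cons c t ih =>
    simp only [List.foldl_cons, List.filterMap_cons]
    cases h : keyToIndex.get? c <;> simp [ih]

theorem singleton_infix_iff {c : Char} {l : List Char} : [c] <:+: l ↔ c ∈ l := by
  constructor
  · intro h; exact h.mem (List.mem_singleton_self c)
  · intro h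
    obtain ⟨s1, s2, rfl⟩ := List.append_of_mem h
    exact ⟨s1, s2, by simp⟩

theorem isIn_single (c : Char) (s : String) :
    PySem.Str.isIn (String.ofList [c]) s = true ↔ c ∈ s.toList := by
  rw [PySem.Str.isIn_iff_infix]
  have h : (String.ofList [c]).toList = [c] := by simp
  rw [h]
  exact singleton_infix_iff

theorem mem_if_singleton (c : Prop) [Decidable c] (i x : Int) :
    x ∈ (if c then [i] else ([] : List Int)) ↔ c ∧ x = i := by
  split_ifs with h <;> simp_all

theorem mem_aShape_iff (s : String) (x : Int) :
    x ∈ aShape s ↔ ∃ ch ∈ s.toList, keyToIndex.get? ch = some x := by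
  unfold aShape
  simp only [List.mem_append, mem_if_singleton]
  constructor
  · rintro (((((⟨h, rfl⟩ | ⟨h, rfl⟩) | ⟨h, rfl⟩) | ⟨h, rfl⟩) | ⟨h, rfl⟩) | ⟨h, rfl⟩)
    · exact ⟨'m', (isIn_single 'm' s).mp h, by simp [get?_keyToIndex]⟩
    · exact ⟨'n', (isIn_single 'n' s).mp h, by simp [get?_keyToIndex]⟩
    · exact ⟨'b', (isIn_single 'b' s).mp h, by simp [get?_keyToIndex]⟩
    · exact ⟨'3', (isIn_single '3' s).mp h, by simp [get?_keyToIndex]⟩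
    · exact ⟨'2', (isIn_single '2' s).mp h, by simp [get?_keyToIndex]⟩
    · exact ⟨'1', (isIn_single '1' s).mp h, by simp [get?_keyToIndex]⟩
  · rintro ⟨ch, hmem, hget⟩
    rw [get?_keyToIndex] at hget
    split_ifs at hget with h1 h2 h3 h4 h5 h6
    · injection hget with hx; subst hx; subst h1
      exact Or.inl (Or.inl (Or.inl (Or.inl (Or.inl ⟨(isIn_single 'm' s).mpr hmem, rfl⟩))))
    · injection hget with hx; subst hx; subst h2
      exact Or.inl (Or.inl (Or.inl (Or.inl (Or.inr ⟨(isIn_single 'n' s).mpr hmem, rfl⟩))))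
    · injection hget with hx; subst hx; subst h3
      exact Or.inl (Or.inl (Or.inl (Or.inr ⟨(isIn_single 'b' s).mpr hmem, rfl⟩)))
    · injection hget with hx; subst hx; subst h4
      exact Or.inl (Or.inl (Or.inr ⟨(isIn_single '3' s).mpr hmem, rfl⟩))
    · injection hget with hx; subst hx; subst h5
      exact Or.inl (Or.inr ⟨(isIn_single '2' s).mpr hmem, rfl⟩)
    · injection hget with hx; subst hx; subst h6
      exact Or.inr ⟨(isIn_single '1' s).mpr hmem, rfl⟩

theorem alt_eq_sorted (s : String) :
    input_to_fingers_alt s =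
      PySem.List.sorted (PySem.Set.ofList (s.toList.filterMap keyToIndex.get?)) (fun x => x) false := by
  unfold input_to_fingers_alt
  rw [fold_eq_filterMap]
  rfl

-- ===== VERDICT (by name: the statement is the Claim_ definition above) =====
theorem input_to_fingers_spec : Claim_equal_input_to_fingers := by
  intro s _hdom
  unfold Spec_input_to_fingers
  rw [alt_eq_sorted, input_to_fingers_eq_aShape]
  refine Eq.symm (PySem.List.sorted_eq_of_perm_of_pairwise_lt _ _ _ ?_ ?_)
  · refine (List.perm_ext_iff_of_nodup ?_ (PySem.Set.nodup_ofList _)).mpr ?_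
    · exact ((aShape_pairwise_lt s).imp fun h => ne_of_lt h)
    · intro x
      rw [PySem.Set.mem_ofList, List.mem_filterMap, mem_aShape_iff]
  · exact aShape_pairwise_lt s
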